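-- pv_equiv track=rewrite | github.com/jibinjosepez/recette | scripts/recipe_analyzer.py | get_ingr_map_from_recipie_to_maram
-- ===== SOURCE A (Python) =====
-- def get_ingr_map_from_recipie_to_maram(ingr_from_marm, ingr_from_recipie):
--     map = {}
--     missing_dict = {}
--     marm_set = set(ingr_from_marm)
--     for rec in ingr_from_recipie.keys():
--         if rec in marm_set:
--             map[rec] = rec
--         else:
--             for ingr in ingr_from_marm:
--                 if ingr in rec:
--                     map[rec] = ingr
--                     break
--         if not rec in map:
--             map[rec] = rec
--             if rec in missing_dict.keys():
--                 missing_dict[rec] += 1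
--             else:
--                 missing_dict[rec] = 1
--     return (map, missing_dict)
-- ===== SOURCE B (Python) =====
-- def get_ingr_map_from_recipie_to_maram(ingr_from_marm, ingr_from_recipie):
--     keys = list(ingr_from_recipie)
--     marm_set = set(ingr_from_marm)
--     assigned = {}
--     pending = [r for r in keys if r not in marm_set]
--     for g in ingr_from_marm:
--         still = []
--         for r in pending:
--             if g in r:
--                 assigned[r] = g
--             else:
--                 still.append(r)
--         pending = still
--     mapping = {r: (r if r in marm_set else assigned.get(r, r)) for r in keys}
--     missing = {r: 1 for r in keys if r not in marm_set and r not in assigned}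
--     return (mapping, missing)
-- ===== Notes on version B (the rewrite author's own statement) =====
-- stated objective: alternative
-- what changed: B inverts the loop nesting: instead of scanning the whole marm list inside each recipe, it makes one marm-outer pass over a shrinking pending list assigning each still-unmatched recipe its first matching marm ingredient, then emits the map and missing dicts by comprehensions over the keys.
import Mathlib
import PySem

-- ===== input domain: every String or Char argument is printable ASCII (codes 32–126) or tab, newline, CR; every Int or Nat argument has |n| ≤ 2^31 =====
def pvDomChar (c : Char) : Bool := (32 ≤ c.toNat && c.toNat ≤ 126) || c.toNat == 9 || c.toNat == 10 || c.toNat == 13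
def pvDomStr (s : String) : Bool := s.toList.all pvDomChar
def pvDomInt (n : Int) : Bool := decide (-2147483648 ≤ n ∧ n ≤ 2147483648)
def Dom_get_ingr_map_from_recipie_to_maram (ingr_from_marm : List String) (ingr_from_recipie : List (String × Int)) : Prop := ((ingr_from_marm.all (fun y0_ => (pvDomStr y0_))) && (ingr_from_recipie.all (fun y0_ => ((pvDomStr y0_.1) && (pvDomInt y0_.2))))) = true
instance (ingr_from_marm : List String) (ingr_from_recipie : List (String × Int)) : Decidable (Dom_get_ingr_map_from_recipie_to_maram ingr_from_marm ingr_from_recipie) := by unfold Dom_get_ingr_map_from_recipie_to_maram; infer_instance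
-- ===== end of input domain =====

-- B re-implements A with the loop nesting inverted (one marm-outer pass over a shrinking
-- pending list, results emitted afterwards); alternative structure, same worst-case cost.

-- ===== PORT A =====
-- inner loop: 'for ingr in ingr_from_marm: if ingr in rec: map[rec] = ingr; break'
def pvAInner (marm : List String) (rec : String) (mp : PySem.Dict String String) : PySem.Dict String String :=
  match marm with
  | [] => mp
  | g :: rest => if PySem.Str.isIn g rec then mp.insert rec g else pvAInner rest rec mp

-- one iteration of A's 'for rec in ingr_from_recipie.keys(): …'
def pvAStep (marm : List String) (marm_set : PySem.Set String)
    (st : PySem.Dict String String × PySem.Dict String Int) (rec : String) :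
    PySem.Dict String String × PySem.Dict String Int :=
  let mp := if PySem.Set.contains marm_set rec then st.1.insert rec rec
            else pvAInner marm rec st.1
  if mp.contains rec then (mp, st.2)
  else (mp.insert rec rec,
        if st.2.contains rec then st.2.insert rec (st.2.getD rec 0 + 1) else st.2.insert rec 1)

def get_ingr_map_from_recipie_to_maram (ingr_from_marm : List String) (ingr_from_recipie : List (String × Int)) : (List (String × String)) × (List (String × Int)) :=
  let marm_set : PySem.Set String := PySem.Set.ofList ingr_from_marm
  let st := ((PySem.Dict.ofList ingr_from_recipie).keys).foldl
    (pvAStep ingr_from_marm marm_set) (PySem.Dict.empty, PySem.Dict.empty)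
  (st.1.items, st.2.items)

-- ===== PORT B =====
-- one marm-outer pass: 'still = []; for r in pending: if g in r: assigned[r] = g else: still.append(r)'
def pvBPass (g : String) (st : PySem.Dict String String × List String) :
    PySem.Dict String String × List String :=
  st.2.foldl (fun st2 r => if PySem.Str.isIn g r then (st2.1.insert r g, st2.2)
                           else (st2.1, st2.2 ++ [r])) (st.1, [])

def get_ingr_map_from_recipie_to_maram_alt (ingr_from_marm : List String) (ingr_from_recipie : List (String × Int)) : (List (String × String)) × (List (String × Int)) :=
  let keys := (PySem.Dict.ofList ingr_from_recipie).keys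
  let marm_set : PySem.Set String := PySem.Set.ofList ingr_from_marm
  let pending := keys.filter (fun r => !(PySem.Set.contains marm_set r))
  let st := ingr_from_marm.foldl (fun st g => pvBPass g st) (PySem.Dict.empty, pending)
  let assigned := st.1
  (keys.map (fun r => (r, if PySem.Set.contains marm_set r then r else assigned.getD r r)),
   (keys.filter (fun r => !(PySem.Set.contains marm_set r) && !(assigned.contains r))).map
     (fun r => (r, (1 : Int))))

-- ===== PRECONDITION & SPEC =====
def Spec_get_ingr_map_from_recipie_to_maram (ingr_from_marm : List String) (ingr_from_recipie : List (String × Int)) (out : (List (String × String)) × (List (String × Int))) : Prop := out = get_ingr_map_from_recipie_to_maram_alt ingr_from_marm ingr_from_recipie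
instance (ingr_from_marm : List String) (ingr_from_recipie : List (String × Int)) (out : (List (String × String)) × (List (String × Int))) : Decidable (Spec_get_ingr_map_from_recipie_to_maram ingr_from_marm ingr_from_recipie out) := by unfold Spec_get_ingr_map_from_recipie_to_maram; infer_instance

-- ===== CLAIM (what is proved, stated in full; the proofs are below) =====
def Claim_equal_get_ingr_map_from_recipie_to_maram : Prop := ∀ (ingr_from_marm : List String) (ingr_from_recipie : List (String × Int)), Dom_get_ingr_map_from_recipie_to_maram ingr_from_marm ingr_from_recipie → Spec_get_ingr_map_from_recipie_to_maram ingr_from_marm ingr_from_recipie (get_ingr_map_from_recipie_to_maram ingr_from_marm ingr_from_recipie)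

-- ===== LEMMAS AND PROOFS =====

-- first marm ingredient that is a substring of r
def pvFM (marm : List String) (r : String) : Option String :=
  marm.find? (fun g => PySem.Str.isIn g r)

-- the value A's map ends up holding at key r
def pvVal (marm : List String) (r : String) : String :=
  if PySem.Set.contains (PySem.Set.ofList marm) r then r else (pvFM marm r).getD r

-- r goes to missing_dict
def pvMiss (marm : List String) (r : String) : Bool :=
  !(PySem.Set.contains (PySem.Set.ofList marm) r) && !(pvFM marm r).isSome

lemma pvAInner_eq (marm : List String) (r : String) (mp : PySem.Dict String String) :
    pvAInner marm r mp = match pvFM marm r with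
      | some g => mp.insert r g
      | none => mp := by
  induction marm with
  | nil => simp [pvAInner, pvFM]
  | cons g rest ih =>
    simp only [pvAInner, pvFM, List.find?]
    cases h : PySem.Str.isIn g r <;> simp [ih, pvFM]

lemma pvA_loop (marm : List String) (keys : List String)
    (mp : PySem.Dict String String) (ms : PySem.Dict String Int)
    (hnd : keys.Nodup)
    (hmp : ∀ r ∈ keys, mp.contains r = false)
    (hms : ∀ r ∈ keys, ms.contains r = false) :
    (keys.foldl (pvAStep marm (PySem.Set.ofList marm)) (mp, ms)).1.items
      = mp.items ++ keys.map (fun r => (r, pvVal marm r))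
    ∧ (keys.foldl (pvAStep marm (PySem.Set.ofList marm)) (mp, ms)).2.items
      = ms.items ++ (keys.filter (pvMiss marm)).map (fun r => (r, (1 : Int))) := by
  induction keys generalizing mp ms with
  | nil => simp
  | cons r keys ih =>
    have hr_mp : mp.contains r = false := hmp r (by simp)
    have hr_ms : ms.contains r = false := hms r (by simp)
    have hnd' : keys.Nodup := hnd.of_cons
    have hr_notin : r ∉ keys := by
      intro h; exact (List.nodup_cons.mp hnd).1 h
    -- characterise one step
    simp only [List.foldl_cons]
    by_cases hset : r ∈ marm
    · -- exact-match branch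
      have hstep : pvAStep marm (PySem.Set.ofList marm) (mp, ms) r = (mp.insert r r, ms) := by
        simp [pvAStep, hset, PySem.Dict.contains_insert_self]
      rw [hstep]
      have hval : pvVal marm r = r := by simp [pvVal, hset]
      have hmiss : pvMiss marm r = false := by simp [pvMiss, hset]
      obtain ⟨h1, h2⟩ := ih (mp.insert r r) ms hnd'
        (fun r' hr' => by
          rw [PySem.Dict.contains_insert]
          have : (r' == r) = false := by
            simp only [beq_eq_false_iff_ne]; intro h; exact hr_notin (h ▸ hr')
          simp [this, hmp r' (by simp [hr'])])
        (fun r' hr' => hms r' (by simp [hr']))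
      refine ⟨?_, ?_⟩
      · rw [h1, PySem.Dict.items_insert_of_not_contains _ _ hr_mp]; simp [hval]
      · rw [h2]; simp [hmiss]
    · -- substring branch
      have hsetF := hset
      cases hfm : pvFM marm r with
      | some g =>
        have hstep : pvAStep marm (PySem.Set.ofList marm) (mp, ms) r = (mp.insert r g, ms) := by
          simp [pvAStep, hsetF, pvAInner_eq, hfm, PySem.Dict.contains_insert_self]
        rw [hstep]
        have hval : pvVal marm r = g := by simp [pvVal, hsetF, hfm]
        have hmiss : pvMiss marm r = false := by simp [pvMiss, hfm]
        obtain ⟨h1, h2⟩ := ih (mp.insert r g) ms hnd'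
          (fun r' hr' => by
            rw [PySem.Dict.contains_insert]
            have : (r' == r) = false := by
              simp only [beq_eq_false_iff_ne]; intro h; exact hr_notin (h ▸ hr')
            simp [this, hmp r' (by simp [hr'])])
          (fun r' hr' => hms r' (by simp [hr']))
        refine ⟨?_, ?_⟩
        · rw [h1, PySem.Dict.items_insert_of_not_contains _ _ hr_mp]; simp [hval]
        · rw [h2]; simp [hmiss]
      | none =>
        have hstep : pvAStep marm (PySem.Set.ofList marm) (mp, ms) r
            = (mp.insert r r, ms.insert r 1) := by
          simp [pvAStep, hsetF, pvAInner_eq, hfm, hr_mp, hr_ms]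
        rw [hstep]
        have hval : pvVal marm r = r := by simp [pvVal, hsetF, hfm]
        have hmiss : pvMiss marm r = true := by simp [pvMiss, hsetF, hfm]
        obtain ⟨h1, h2⟩ := ih (mp.insert r r) (ms.insert r 1) hnd'
          (fun r' hr' => by
            rw [PySem.Dict.contains_insert]
            have : (r' == r) = false := by
              simp only [beq_eq_false_iff_ne]; intro h; exact hr_notin (h ▸ hr')
            simp [this, hmp r' (by simp [hr'])])
          (fun r' hr' => by
            rw [PySem.Dict.contains_insert]
            have : (r' == r) = false := by
              simp only [beq_eq_false_iff_ne]; intro h; exact hr_notin (h ▸ hr')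
            simp [this, hms r' (by simp [hr'])])
        refine ⟨?_, ?_⟩
        · rw [h1, PySem.Dict.items_insert_of_not_contains _ _ hr_mp]; simp [hval]
        · rw [h2, PySem.Dict.items_insert_of_not_contains _ _ hr_ms]
          simp [hmiss]

-- B: one pass over pending, unfolded (generic in the match predicate p and stored value v)
lemma pvPass_eq (p : String → Bool) (v : String) (P : List String) :
    ∀ (d : PySem.Dict String String) (acc : List String),
      P.foldl (fun st2 r => if p r then (st2.1.insert r v, st2.2)
                            else (st2.1, st2.2 ++ [r])) (d, acc)
        = (P.foldl (fun d r => if p r then d.insert r v else d) d,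
           acc ++ P.filter (fun r => !(p r))) := by
  induction P with
  | nil => intro d acc; simp
  | cons r P ih =>
    intro d acc
    cases h : p r <;> simp [h, ih]

lemma pvBPass_eq (g : String) (d : PySem.Dict String String) (P : List String) :
    pvBPass g (d, P)
      = (P.foldl (fun d r => if PySem.Str.isIn g r then d.insert r g else d) d,
         P.filter (fun r => !(PySem.Str.isIn g r))) := by
  simpa [pvBPass] using pvPass_eq (fun r => PySem.Str.isIn g r) g P d []

-- the inner fold leaves keys it does not match untouched
lemma pvInner_get?_of_false (p : String → Bool) (v : String) (P : List String) (r : String)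
    (h : p r = false) :
    ∀ d : PySem.Dict String String,
      (P.foldl (fun d r' => if p r' then d.insert r' v else d) d).get? r = d.get? r := by
  induction P with
  | nil => intro d; simp
  | cons r' P ih =>
    intro d
    cases hr' : p r' with
    | true =>
      have hne : r ≠ r' := by intro he; rw [he, hr'] at h; exact Bool.true_eq_false.mp h
      simp [hr', ih, PySem.Dict.get?_insert_of_ne _ _ hne]
    | false => simp [hr', ih]

lemma pvInner_get?_of_notin (p : String → Bool) (v : String) (P : List String) (r : String)
    (h : r ∉ P) :
    ∀ d : PySem.Dict String String,
      (P.foldl (fun d r' => if p r' then d.insert r' v else d) d).get? r = d.get? r := by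
  induction P with
  | nil => intro d; simp
  | cons r' P ih =>
    intro d
    have hne : r ≠ r' := fun he => h (by simp [he])
    have h' : r ∉ P := fun hm => h (by simp [hm])
    cases hr' : p r' <;>
      simp [hr', ih h', PySem.Dict.get?_insert_of_ne _ _ hne]

lemma pvInner_get?_of_mem (p : String → Bool) (v : String) (P : List String) (r : String)
    (hmem : r ∈ P) (h : p r = true) :
    ∀ d : PySem.Dict String String,
      (P.foldl (fun d r' => if p r' then d.insert r' v else d) d).get? r = some v := by
  induction P with
  | nil => simp at hmem
  | cons r' P ih =>
    intro d
    by_cases he : r = r'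
    · subst he
      simp only [List.foldl_cons, h, if_true]
      by_cases hr : r ∈ P
      · exact ih hr _
      · rw [pvInner_get?_of_notin p v P r hr, PySem.Dict.get?_insert_self]
    · have hr : r ∈ P := by
        rcases List.mem_cons.mp hmem with h' | h'
        · exact absurd h' he
        · exact h'
      cases hx : p r' <;> simp [hx, ih hr]

-- outer loop never touches keys outside pending
lemma pvB_outer_untouched (marm : List String) (r : String) :
    ∀ (d : PySem.Dict String String) (P : List String), r ∉ P →
      ((marm.foldl (fun st g => pvBPass g st) (d, P)).1).get? r = d.get? r := by
  induction marm with
  | nil => intro d P _; simp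
  | cons g rest ih =>
    intro d P hP
    simp only [List.foldl_cons, pvBPass_eq]
    rw [ih _ _ (fun hm => hP (List.mem_filter.mp hm).1)]
    exact pvInner_get?_of_notin (fun r' => PySem.Str.isIn g r') g P r hP d

-- main B invariant: a pending key ends up mapped to its first substring match
lemma pvB_outer_get? (marm : List String) (r : String) :
    ∀ (d : PySem.Dict String String) (P : List String), r ∈ P → d.get? r = none →
      ((marm.foldl (fun st g => pvBPass g st) (d, P)).1).get? r = pvFM marm r := by
  induction marm with
  | nil => intro d P _ hd; simpa [pvFM] using hd
  | cons g rest ih =>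
    intro d P hP hd
    simp only [List.foldl_cons, pvBPass_eq]
    cases h : PySem.Str.isIn g r with
    | true =>
      have hnotin : r ∉ P.filter (fun r => !(PySem.Str.isIn g r)) := by
        intro hm
        have := (List.mem_filter.mp hm).2
        rw [h] at this; simp at this
      rw [pvB_outer_untouched rest r _ _ hnotin,
        pvInner_get?_of_mem (fun r' => PySem.Str.isIn g r') g P r hP h d]
      unfold pvFM
      exact (List.find?_cons_of_pos (p := fun g' => PySem.Str.isIn g' r) (l := rest) h).symm
    | false =>
      have hin : r ∈ P.filter (fun r => !(PySem.Str.isIn g r)) := by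
        rw [List.mem_filter, h]; simp [hP]
      rw [ih _ _ hin
        (by rw [pvInner_get?_of_false (fun r' => PySem.Str.isIn g r') g P r h d]; exact hd)]
      unfold pvFM
      rw [List.find?_cons_of_neg (p := fun g' => PySem.Str.isIn g' r) (l := rest) (by simp only [h]; exact Bool.false_ne_true)]

lemma pvItems_empty (ν : Type) : (PySem.Dict.empty : PySem.Dict String ν).items = [] := rfl

-- ===== VERDICT (by name: the statement is the Claim_ definition above) =====
theorem get_ingr_map_from_recipie_to_maram_spec : Claim_equal_get_ingr_map_from_recipie_to_maram := by
  intro marm recs _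
  unfold Spec_get_ingr_map_from_recipie_to_maram
  unfold get_ingr_map_from_recipie_to_maram get_ingr_map_from_recipie_to_maram_alt
  set keys := (PySem.Dict.ofList recs).keys with hkeys
  have hnd : keys.Nodup := PySem.Dict.nodup_keys_ofList recs
  obtain ⟨h1, h2⟩ := pvA_loop marm keys PySem.Dict.empty PySem.Dict.empty hnd
    (fun r _ => by simp) (fun r _ => by simp)
  simp only []
  rw [h1, h2]
  simp only [pvItems_empty, List.nil_append]
  have hget : ∀ r ∈ keys, r ∉ marm →
      ((marm.foldl (fun st g => pvBPass g st)
        (PySem.Dict.empty,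
         keys.filter (fun r => !(PySem.Set.contains (PySem.Set.ofList marm) r)))).1).get? r
        = pvFM marm r := by
    intro r hr hset
    refine pvB_outer_get? marm r _ _ ?_ (by simp)
    rw [List.mem_filter]
    refine ⟨hr, ?_⟩
    have hc : PySem.Set.contains (PySem.Set.ofList marm) r = false := by
      rw [Bool.eq_false_iff]
      intro hc'
      exact hset ((PySem.Set.mem_ofList marm r).mp ((PySem.Set.contains_iff _ r).mp hc'))
    rw [hc]; rfl
  refine Prod.ext_iff.mpr ⟨?_, ?_⟩
  · apply List.map_congr_left
    intro r hr
    by_cases hset : r ∈ marm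
    · have hc : PySem.Set.contains (PySem.Set.ofList marm) r = true :=
        (PySem.Set.contains_iff _ r).mpr ((PySem.Set.mem_ofList marm r).mpr hset)
      simp only [pvVal, hc, if_true]
    · have hc : PySem.Set.contains (PySem.Set.ofList marm) r = false := by
        rw [Bool.eq_false_iff]
        intro hc'
        exact hset ((PySem.Set.mem_ofList marm r).mp ((PySem.Set.contains_iff _ r).mp hc'))
      simp only [pvVal, hc, Bool.false_eq_true, if_false]
      rw [PySem.Dict.getD_eq_get?_getD, hget r hr hset]
  · refine congrArg (List.map (fun r => (r, (1 : Int)))) (List.filter_congr ?_)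
    intro r hr
    by_cases hset : r ∈ marm
    · have hc : PySem.Set.contains (PySem.Set.ofList marm) r = true :=
        (PySem.Set.contains_iff _ r).mpr ((PySem.Set.mem_ofList marm r).mpr hset)
      simp only [pvMiss, hc, Bool.not_true, Bool.false_and]
    · have hc : PySem.Set.contains (PySem.Set.ofList marm) r = false := by
        rw [Bool.eq_false_iff]
        intro hc'
        exact hset ((PySem.Set.mem_ofList marm r).mp ((PySem.Set.contains_iff _ r).mp hc'))
      simp only [pvMiss, hc, Bool.not_false, Bool.true_and]
      rw [PySem.Dict.contains_eq_isSome_get?, hget r hr hset]
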